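-- pv_equiv track=rewrite | github.com/Sophia-CO/PCS2--Homework-IV | SSEQ.py | sseq
-- ===== SOURCE A (Python) =====
-- def sseq(s1, s2):
--     result = ''
--     sq = 0
--     for i in s2:
--         ssq = s1.find(i)
--         result = result + str(ssq + 1 + sq) + " "
--         sq = sq + ssq + 1
--         s1 = s1[ssq + 1:]
--     return result
-- ===== SOURCE B (Python) =====
-- def sseq(s1, s2):
--     parts = []
--     pos = 0
--     for c in s2:
--         j = s1.find(c, pos)
--         if j != -1:
--             pos = j + 1
--         parts.append(str(pos))
--     return ''.join(p + ' ' for p in parts)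
-- ===== Notes on version B (the rewrite author's own statement) =====
-- stated objective: faster
-- what changed: B replaces A's repeated slicing of s1 (s1 = s1[ssq+1:], copying the remaining string for every char of s2) and running-offset bookkeeping by a single advancing index passed to s1.find(c, pos), collecting the positions in a list joined once at the end.
import Mathlib
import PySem

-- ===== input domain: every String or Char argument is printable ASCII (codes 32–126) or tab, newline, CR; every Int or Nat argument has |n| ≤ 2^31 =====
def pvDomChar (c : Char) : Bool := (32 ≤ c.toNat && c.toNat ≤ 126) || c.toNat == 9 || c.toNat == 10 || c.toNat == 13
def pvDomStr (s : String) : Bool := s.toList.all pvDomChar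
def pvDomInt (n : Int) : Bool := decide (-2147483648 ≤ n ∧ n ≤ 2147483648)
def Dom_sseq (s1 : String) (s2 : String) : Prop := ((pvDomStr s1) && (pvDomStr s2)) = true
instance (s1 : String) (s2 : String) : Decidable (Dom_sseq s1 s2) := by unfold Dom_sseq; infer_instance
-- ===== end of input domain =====

-- B replaces A's repeated slicing of s1 and running offset by one advancing index passed to find(c, pos); return values are proved equal (objective: faster, constant factor — no copying).

-- ===== PORT A =====
-- loop state: remaining s1, remaining chars of s2, result so far, sq
def sseqGoA : List Char → List Char → List Char → Int → List Char
  | _, [], res, _ => res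
  | s1, c :: rest, res, sq =>
    let ssq := PySem.Chars.find s1 [c]
    sseqGoA (PySem.List.slice s1 (some (ssq + 1)) none) rest
      (res ++ PySem.Int.toChars (ssq + 1 + sq) ++ [' ']) (sq + ssq + 1)

def sseq (s1 : String) (s2 : String) : String :=
  String.ofList (sseqGoA s1.toList s2.toList [] 0)

-- ===== PORT B =====
-- loop state: advancing index pos, list of collected position strings
def sseqGoB (s1 : List Char) : List Char → Int → List (List Char) → List (List Char)
  | [], _, parts => parts
  | c :: rest, pos, parts =>
    let j := PySem.Chars.findFrom s1 [c] pos none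
    let pos' := if j ≠ -1 then j + 1 else pos
    sseqGoB s1 rest pos' (parts ++ [PySem.Int.toChars pos'])

def sseq_alt (s1 : String) (s2 : String) : String :=
  String.ofList (((sseqGoB s1.toList s2.toList 0 []).map (· ++ [' '])).flatten)

-- ===== PRECONDITION & SPEC =====
def Spec_sseq (s1 : String) (s2 : String) (out : String) : Prop := out = sseq_alt s1 s2
instance (s1 : String) (s2 : String) (out : String) : Decidable (Spec_sseq s1 s2 out) := by unfold Spec_sseq; infer_instance

-- ===== CLAIM (what is proved, stated in full; the proofs are below) =====
def Claim_equal_sseq : Prop := ∀ (s1 : String) (s2 : String), Dom_sseq s1 s2 → Spec_sseq s1 s2 (sseq s1 s2)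

-- ===== LEMMAS AND PROOFS =====

-- B's accumulator is only ever appended to
lemma sseqGoB_acc (s1 s2 : List Char) (pos : Int) (parts : List (List Char)) :
    sseqGoB s1 s2 pos parts = parts ++ sseqGoB s1 s2 pos [] := by
  induction s2 generalizing pos parts with
  | nil => simp [sseqGoB]
  | cons c rest ih =>
    simp only [sseqGoB]
    rw [ih]
    conv_rhs => rw [ih]
    simp

-- main invariant: when A's remaining string is s1.drop k and sq = k, the two loops agree
lemma sseq_main (s2 : List Char) (s1 : List Char) (k : Nat) (hk : k ≤ s1.length)
    (res : List Char) :
    sseqGoA (s1.drop k) s2 res (k : Int) =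
      res ++ ((sseqGoB s1 s2 (k : Int) []).map (· ++ [' '])).flatten := by
  induction s2 generalizing k res with
  | nil => simp [sseqGoA, sseqGoB]
  | cons c rest ih =>
    have hfind := PySem.Chars.findFrom_natCast s1 [c] k hk
    simp only [sseqGoA, sseqGoB, hfind]
    by_cases h : PySem.Chars.find (s1.drop k) [c] = -1
    · -- not found: state unchanged, current position appended
      rw [h]
      norm_num
      rw [ih k hk]
      conv_rhs => rw [sseqGoB_acc]
      simp
    · -- found at nonnegative offset F into the remaining string
      have hf0 : 0 ≤ PySem.Chars.find (s1.drop k) [c] := by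
        have := PySem.Chars.neg_one_le_find (s1.drop k) [c]
        omega
      have hk' : k + (PySem.Chars.find (s1.drop k) [c]).toNat + 1 ≤ s1.length := by
        rcases (PySem.Chars.find_spec hf0).1 with ⟨t, ht⟩
        have hlen := congrArg List.length ht
        simp at hlen
        omega
      have hjne : ((k : Int) + PySem.Chars.find (s1.drop k) [c] ≠ -1) := by omega
      rw [if_neg h, if_pos hjne]
      have hslice : PySem.List.slice (s1.drop k)
            (some (PySem.Chars.find (s1.drop k) [c] + 1))
          = s1.drop (k + (PySem.Chars.find (s1.drop k) [c]).toNat + 1) := by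
        rw [PySem.List.slice_from _ (by omega), List.drop_drop]
        congr 1
        omega
      rw [hslice]
      rw [show PySem.Chars.find (s1.drop k) [c] + 1 + (k : Int)
            = ((k + (PySem.Chars.find (s1.drop k) [c]).toNat + 1 : Nat) : Int) by
          push_cast; omega]
      rw [show (k : Int) + PySem.Chars.find (s1.drop k) [c] + 1
            = ((k + (PySem.Chars.find (s1.drop k) [c]).toNat + 1 : Nat) : Int) by
          push_cast; omega]
      rw [ih _ hk']
      conv_rhs => rw [sseqGoB_acc]
      simp

-- ===== VERDICT (by name: the statement is the Claim_ definition above) =====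
theorem sseq_spec : Claim_equal_sseq := by
  intro s1 s2 _
  unfold Spec_sseq sseq sseq_alt
  have := sseq_main s2.toList s1.toList 0 (Nat.zero_le _) []
  simpa using congrArg String.ofList this
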